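-- pv_equiv track=rewrite | github.com/1037827920/test-clang-lto | draw.py | transpose_data
-- ===== SOURCE A (Python) =====
-- def transpose_data(raw_data):
--     """将原始数据转置为CSV需要的格式"""
--     # 提取并发数列（每行第一个元素）
--     concurrency_nums = [row[0] for row in raw_data]
--
--     # 构建表头
--     column_headers = ['并发数'] + concurrency_nums
--     transposed = [column_headers]
--
--     # 动态生成每一列的标题，如 '第一次TpmC', '第二次TpmC', ...
--     num_columns = len(raw_data[0])  # 获取列数
--     for i in range(1, num_columns):
--         transposed.append([f"第{i}次TpmC"] + [row[i] for row in raw_data])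
--     return transposed
-- ===== SOURCE B (Python) =====
-- def transpose_data(raw_data):
--     """将原始数据转置为CSV需要的格式"""
--     num_columns = len(raw_data[0])
--     # one result row per output column, each starting with its header
--     result = [['并发数']] + [[f"第{i}次TpmC"] for i in range(1, num_columns)]
--     # single pass over the input rows, scattering each cell into its column row
--     for row in raw_data:
--         for i in range(num_columns):
--             result[i].append(row[i])
--     return result
-- ===== Notes on version B (the rewrite author's own statement) =====
-- stated objective: alternative
-- what changed: A gathers each output column by rescanning all rows once per column (columns-outer with per-column list comprehensions); B does one scatter pass over the rows, appending each cell of a row into a maintained per-column accumulator row initialized with its header.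
import Mathlib
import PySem

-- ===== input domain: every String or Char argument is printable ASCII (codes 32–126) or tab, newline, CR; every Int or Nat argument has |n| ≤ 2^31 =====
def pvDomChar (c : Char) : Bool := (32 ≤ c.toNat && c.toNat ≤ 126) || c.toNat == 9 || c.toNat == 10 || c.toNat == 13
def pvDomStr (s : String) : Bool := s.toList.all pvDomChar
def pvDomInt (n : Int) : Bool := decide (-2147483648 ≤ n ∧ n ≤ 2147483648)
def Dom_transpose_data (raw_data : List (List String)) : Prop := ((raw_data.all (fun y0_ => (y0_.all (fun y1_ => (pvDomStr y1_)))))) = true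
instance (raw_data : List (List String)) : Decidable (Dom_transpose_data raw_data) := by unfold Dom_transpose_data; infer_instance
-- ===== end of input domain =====

-- B replaces A's columns-outer gather (one rescan of all rows per column) by a single
-- rows-outer scatter pass into per-column accumulator rows; same O(rows*cols) cost.

-- ===== PORT A =====
-- literal port of A: row[i] → pyGetD (Pre_ guarantees the index is in range)
def transpose_data (raw_data : List (List String)) : List (List String) :=
  let concurrency_nums := raw_data.map (fun row => PySem.List.pyGetD row 0 "")
  let column_headers := "并发数" :: concurrency_nums
  let transposed : List (List String) := [column_headers]
  let num_columns : Int := ((raw_data.headD []).length : Int)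
  (PySem.List.pyRange 1 num_columns 1).foldl
    (fun acc i =>
      acc ++ [("第" ++ PySem.Int.toStr i ++ "次TpmC") ::
                raw_data.map (fun row => PySem.List.pyGetD row i "")])
    transposed

-- ===== PORT B =====
def transpose_data_alt (raw_data : List (List String)) : List (List String) :=
  let num_columns : Int := ((raw_data.headD []).length : Int)
  let result : List (List String) :=
    ["并发数"] ::
      (PySem.List.pyRange 1 num_columns 1).map
        (fun i => ["第" ++ PySem.Int.toStr i ++ "次TpmC"])
  raw_data.foldl
    (fun res row =>
      (PySem.List.pyRange 0 num_columns 1).foldl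
        (fun r i => r.modify i.toNat (fun col => col ++ [PySem.List.pyGetD row i ""]))
        res)
    result

-- ===== PRECONDITION & SPEC =====
-- Pre_ excludes exactly the inputs on which Python A raises IndexError:
-- empty raw_data (raw_data[0]) and rows shorter than the first row / empty rows (row[i], row[0]).
def Pre_transpose_data (raw_data : List (List String)) : Prop :=
  raw_data ≠ [] ∧
    ∀ row ∈ raw_data, 1 ≤ row.length ∧ (raw_data.headD []).length ≤ row.length

instance (raw_data : List (List String)) : Decidable (Pre_transpose_data raw_data) := by
  unfold Pre_transpose_data; infer_instance

def pvWitness_transpose_data : List (List String) := [["10", "100"], ["20", "200"]]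

def Spec_transpose_data (raw_data : List (List String)) (out : List (List String)) : Prop :=
  out = transpose_data_alt raw_data

instance (raw_data : List (List String)) (out : List (List String)) :
    Decidable (Spec_transpose_data raw_data out) := by
  unfold Spec_transpose_data; infer_instance

-- ===== CLAIM (what is proved, stated in full; the proofs are below) =====
def Claim_equal_transpose_data : Prop :=
  ∀ (raw_data : List (List String)), Dom_transpose_data raw_data →
    Pre_transpose_data raw_data → Spec_transpose_data raw_data (transpose_data raw_data)

-- ===== LEMMAS AND PROOFS =====

-- A's loop: foldl appending one element per index is the map over the range
theorem pv_foldl_append {α β : Type} (f : α → β) (l : List α) (init : List β) :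
    l.foldl (fun acc i => acc ++ [f i]) init = init ++ l.map f := by
  induction l generalizing init with
  | nil => simp
  | cons a t ih => simp [List.foldl_cons, ih, List.append_assoc]

-- range(1, m+1) as a map over List.range m
theorem pv_range (m : ℕ) :
    PySem.List.pyRange 1 ((m + 1 : ℕ) : Int) 1
      = (List.range m).map (fun k => ((k + 1 : ℕ) : Int)) := by
  have h1 : ((((m + 1 : ℕ) : Int)) - 1).toNat = m := by push_cast; omega
  rw [PySem.List.pyRange_one, h1]
  apply List.map_congr_left
  intro k _
  push_cast; ring

-- B's inner loop: one pass of modify over indices 0..n-1 acts pointwise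
theorem pv_foldl_modify (n : ℕ) (f : Int → List String → List String)
    (res : List (List String)) :
    (PySem.List.pyRange 0 (n : Int) 1).foldl
        (fun r i => r.modify i.toNat (f i)) res
      = res.mapIdx (fun j col => if j < n then f (j : Int) col else col) := by
  induction n generalizing res with
  | zero =>
    rw [PySem.List.pyRange_one_eq_nil (by norm_num)]
    apply List.ext_getElem <;> simp
  | succ m ih =>
    have hsplit : PySem.List.pyRange 0 ((m + 1 : ℕ) : Int) 1
        = PySem.List.pyRange 0 (m : Int) 1 ++ [(m : Int)] := by
      push_cast
      exact PySem.List.pyRange_one_succ_right (by positivity)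
    rw [hsplit, List.foldl_append, ih]
    apply List.ext_getElem
    · simp
    · intro j h1 h2
      simp only [List.foldl_cons, List.foldl_nil]
      rw [List.getElem_modify]
      by_cases hjm : m = j
      · rw [if_pos (by simpa using hjm)]
        subst hjm
        simp [List.getElem_mapIdx]
      · rw [if_neg (by simpa using hjm)]
        simp only [List.getElem_mapIdx]
        by_cases hlt : j < m
        · rw [if_pos hlt, if_pos (by omega)]
        · rw [if_neg hlt, if_neg (by omega)]

-- B's outer loop invariant: starting from columns (range n).map g, scattering the rows
-- appends raw_data's j-th cells to column j
theorem pv_scatter (n : ℕ) (rows : List (List String)) (g : ℕ → List String) :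
    rows.foldl
        (fun res row =>
          (PySem.List.pyRange 0 (n : Int) 1).foldl
            (fun r i => r.modify i.toNat (fun col => col ++ [PySem.List.pyGetD row i ""]))
            res)
        ((List.range n).map g)
      = (List.range n).map
          (fun j => g j ++ rows.map (fun row => PySem.List.pyGetD row (j : Int) "")) := by
  induction rows generalizing g with
  | nil => simp
  | cons row rest ih =>
    rw [List.foldl_cons, pv_foldl_modify]
    have hstep : (List.mapIdx (fun j col =>
          if j < n then col ++ [PySem.List.pyGetD row (j : Int) ""] else col)
          ((List.range n).map g))
        = (List.range n).map (fun j => g j ++ [PySem.List.pyGetD row (j : Int) ""]) := by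
      apply List.ext_getElem
      · simp
      · intro k h1 h2
        have hk : k < n := by simpa using h2
        simp [List.getElem_mapIdx, hk]
    rw [hstep, ih]
    apply List.map_congr_left
    intro j _
    simp [List.append_assoc]

-- the common initial column list, as a map over range (m+1)
theorem pv_init (m : ℕ) :
    (["并发数"] :: (PySem.List.pyRange 1 ((m + 1 : ℕ) : Int) 1).map
        (fun i => ["第" ++ PySem.Int.toStr i ++ "次TpmC"]))
      = (List.range (m + 1)).map
          (fun (j : ℕ) => if j = 0 then ["并发数"]
                    else ["第" ++ PySem.Int.toStr (j : Int) ++ "次TpmC"]) := by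
  rw [pv_range, List.range_succ_eq_map]
  simp only [List.map_cons, List.map_map]
  congr 1

theorem transpose_data_spec_aux (raw_data : List (List String))
    (hpre : Pre_transpose_data raw_data) :
    transpose_data raw_data = transpose_data_alt raw_data := by
  obtain ⟨hne, hlen⟩ := hpre
  obtain ⟨hd, tl, rfl⟩ := List.exists_cons_of_ne_nil hne
  have hhd : 1 ≤ hd.length := (hlen hd (by simp)).1
  obtain ⟨m, hm⟩ : ∃ m, hd.length = m + 1 := ⟨hd.length - 1, by omega⟩
  unfold transpose_data transpose_data_alt
  simp only [List.headD_cons]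
  rw [hm, pv_foldl_append, pv_init, pv_scatter, pv_range, List.range_succ_eq_map]
  simp only [List.map_cons, List.map_map, List.singleton_append, Nat.cast_zero]
  congr 1

-- ===== VERDICT (by name: the statement is the Claim_ definition above) =====
theorem transpose_data_spec : Claim_equal_transpose_data := by
  intro raw_data _ hpre
  exact transpose_data_spec_aux raw_data hpre
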